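-- pv_equiv track=rewrite | github.com/Milozzz/Word-stress-prediction-system | stress_prediction.py | end_comb
-- ===== SOURCE A (Python) =====
-- all_vowels = ['aa', 'ae', 'ah', 'ao', 'aw', 'ay', 'eh', 'er', 'ey', 'ih', 'iy', 'ow', 'oy', 'uh', 'uw']
--
-- all_consonants = ['b', 'ch', 'd', 'dh', 'f', 'g', 'hh', 'jh', 'k', 'l', 'm', 'n', 'ng', 'r', 's', 'sh', 't', 'th', 'v', 'w', 'y', 'z', 'zh']
--
-- def all_vowel(syllable):
--     if syllable in all_vowels:
--         return True
--     else:
--         return False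
--
-- def all_consonant(syllable):
--     if syllable in all_consonants:
--         return True
--     else:
--         return False
--
-- def end_comb(syllables):
--     result = ''
--     for i in range(1, len(syllables)):
--         one_syllable = syllables[i - 1]
--         two_syllable = syllables[i]
--         if all_consonant(one_syllable) and all_vowel(two_syllable):
--             result = one_syllable + two_syllable
--         elif all_vowel(one_syllable) and all_vowel(two_syllable):
--             result = 'Notation2' + two_syllable
--     return result
-- ===== SOURCE B (Python) =====
-- all_vowels = ['aa', 'ae', 'ah', 'ao', 'aw', 'ay', 'eh', 'er', 'ey', 'ih', 'iy', 'ow', 'oy', 'uh', 'uw']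
--
-- all_consonants = ['b', 'ch', 'd', 'dh', 'f', 'g', 'hh', 'jh', 'k', 'l', 'm', 'n', 'ng', 'r', 's', 'sh', 't', 'th', 'v', 'w', 'y', 'z', 'zh']
--
--
-- def end_comb(syllables):
--     # Scan adjacent pairs from the end; the first match found backwards is
--     # the last match of a forward scan, so we can return early.
--     for i in range(len(syllables) - 1, 0, -1):
--         one_syllable = syllables[i - 1]
--         two_syllable = syllables[i]
--         if one_syllable in all_consonants and two_syllable in all_vowels:
--             return one_syllable + two_syllable
--         if one_syllable in all_vowels and two_syllable in all_vowels:
--             return 'Notation2' + two_syllable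
--     return ''
-- ===== Notes on version B (the rewrite author's own statement) =====
-- stated objective: alternative
-- what changed: B scans adjacent pairs backwards from the end and returns on the first match (the last match of A's forward overwriting scan), instead of A's forward loop that keeps overwriting an accumulator.
import Mathlib
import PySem

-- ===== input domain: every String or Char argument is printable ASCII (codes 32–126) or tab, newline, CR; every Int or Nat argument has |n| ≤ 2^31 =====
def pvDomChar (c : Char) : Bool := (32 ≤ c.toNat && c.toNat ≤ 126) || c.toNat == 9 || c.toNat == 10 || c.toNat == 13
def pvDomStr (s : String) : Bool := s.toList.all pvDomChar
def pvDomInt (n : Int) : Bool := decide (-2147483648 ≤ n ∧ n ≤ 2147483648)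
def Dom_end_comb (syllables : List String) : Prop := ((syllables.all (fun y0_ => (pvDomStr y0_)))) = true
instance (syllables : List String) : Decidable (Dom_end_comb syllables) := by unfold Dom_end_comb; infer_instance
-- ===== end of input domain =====

-- B rewrites A's forward overwriting scan as a backward early-return scan over adjacent pairs (same value, different decomposition).

-- ===== PORT A =====
def all_vowels : List String :=
  ["aa", "ae", "ah", "ao", "aw", "ay", "eh", "er", "ey", "ih", "iy", "ow", "oy", "uh", "uw"]

def all_consonants : List String :=
  ["b", "ch", "d", "dh", "f", "g", "hh", "jh", "k", "l", "m", "n", "ng", "r", "s", "sh", "t", "th", "v", "w", "y", "z", "zh"]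

def all_vowel (syllable : String) : Bool :=
  if all_vowels.contains syllable then true else false

def all_consonant (syllable : String) : Bool :=
  if all_consonants.contains syllable then true else false

def end_comb (syllables : List String) : String :=
  (PySem.List.pyRange 1 (syllables.length : Int) 1).foldl
    (fun result i =>
      let one_syllable := PySem.List.pyGetD syllables (i - 1) ""
      let two_syllable := PySem.List.pyGetD syllables i ""
      if all_consonant one_syllable && all_vowel two_syllable then
        one_syllable ++ two_syllable
      else if all_vowel one_syllable && all_vowel two_syllable then
        "Notation2" ++ two_syllable
      else result) ""

-- ===== PORT B =====
-- backward loop 'for i in range(len-1, 0, -1)': k+1 plays the role of i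
def end_comb_go (syllables : List String) : Nat → String
  | 0 => ""
  | Nat.succ k =>
    let one_syllable := PySem.List.pyGetD syllables (k : Int) ""
    let two_syllable := PySem.List.pyGetD syllables ((k : Int) + 1) ""
    if all_consonants.contains one_syllable && all_vowels.contains two_syllable then
      one_syllable ++ two_syllable
    else if all_vowels.contains one_syllable && all_vowels.contains two_syllable then
      "Notation2" ++ two_syllable
    else end_comb_go syllables k

def end_comb_alt (syllables : List String) : String :=
  end_comb_go syllables (syllables.length - 1)

-- ===== PRECONDITION & SPEC =====
def Spec_end_comb (syllables : List String) (out : String) : Prop := out = end_comb_alt syllables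
instance (syllables : List String) (out : String) : Decidable (Spec_end_comb syllables out) := by unfold Spec_end_comb; infer_instance

-- ===== CLAIM (what is proved, stated in full; the proofs are below) =====
def Claim_equal_end_comb : Prop := ∀ (syllables : List String), Dom_end_comb syllables → Spec_end_comb syllables (end_comb syllables)

-- ===== LEMMAS AND PROOFS =====

-- proof-side: the value a pair contributes, if any
def pairOpt (one two : String) : Option String :=
  if all_consonants.contains one && all_vowels.contains two then some (one ++ two)
  else if all_vowels.contains one && all_vowels.contains two then some ("Notation2" ++ two)
  else none

-- proof-side: the last match among pairs (0,1) … (m-1,m), scanning backwards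
def lastOpt (syllables : List String) : Nat → Option String
  | 0 => none
  | Nat.succ k =>
    match pairOpt (PySem.List.pyGetD syllables (k : Int) "") (PySem.List.pyGetD syllables ((k : Int) + 1) "") with
    | some v => some v
    | none => lastOpt syllables k

theorem pairOpt_getD (one two x : String) :
    (if all_consonant one && all_vowel two then one ++ two
     else if all_vowel one && all_vowel two then "Notation2" ++ two else x)
    = (pairOpt one two).getD x := by
  unfold pairOpt all_consonant all_vowel
  split_ifs <;> simp_all

theorem foldl_eq_lastOpt (syllables : List String) (r : String) (m : Nat) :
    (PySem.List.pyRange 1 ((m : Int) + 1) 1).foldl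
      (fun result i =>
        let one_syllable := PySem.List.pyGetD syllables (i - 1) ""
        let two_syllable := PySem.List.pyGetD syllables i ""
        if all_consonant one_syllable && all_vowel two_syllable then
          one_syllable ++ two_syllable
        else if all_vowel one_syllable && all_vowel two_syllable then
          "Notation2" ++ two_syllable
        else result) r
    = (lastOpt syllables m).getD r := by
  induction m generalizing r with
  | zero =>
    rw [show ((0 : Nat) : Int) + 1 = 1 by omega, PySem.List.pyRange_one_eq_nil (by omega)]
    rfl
  | succ k ih =>
    have hsplit : PySem.List.pyRange 1 ((Nat.succ k : Int) + 1) 1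
        = PySem.List.pyRange 1 ((k : Int) + 1) 1 ++ [(k : Int) + 1] := by
      have h := PySem.List.pyRange_one_succ_right (a := 1) (b := (k : Int) + 1) (by omega)
      push_cast
      exact h
    rw [hsplit, List.foldl_append, ih]
    show (fun result i =>
        let one_syllable := PySem.List.pyGetD syllables (i - 1) ""
        let two_syllable := PySem.List.pyGetD syllables i ""
        if all_consonant one_syllable && all_vowel two_syllable then
          one_syllable ++ two_syllable
        else if all_vowel one_syllable && all_vowel two_syllable then
          "Notation2" ++ two_syllable
        else result) ((lastOpt syllables k).getD r) ((k : Int) + 1)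
      = (lastOpt syllables (k + 1)).getD r
    simp only []
    rw [show ((k : Int) + 1 - 1) = (k : Int) by omega, pairOpt_getD]
    simp only [lastOpt]
    cases pairOpt (PySem.List.pyGetD syllables (k : Int) "")
        (PySem.List.pyGetD syllables ((k : Int) + 1) "") <;> rfl

theorem go_eq_lastOpt (syllables : List String) (m : Nat) :
    end_comb_go syllables m = (lastOpt syllables m).getD "" := by
  induction m with
  | zero => rfl
  | succ k ih =>
    simp only [end_comb_go, lastOpt, ih]
    rcases hp : pairOpt (PySem.List.pyGetD syllables (k : Int) "")
        (PySem.List.pyGetD syllables ((k : Int) + 1) "") with _ | v <;> unfold pairOpt at hp <;> split_ifs at hp <;> simp_all <;> split_ifs <;> simp_all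

-- ===== VERDICT (by name: the statement is the Claim_ definition above) =====
theorem end_comb_spec : Claim_equal_end_comb := by
  intro syllables _
  unfold Spec_end_comb end_comb end_comb_alt
  cases hn : syllables.length with
  | zero =>
    rw [show ((0 : Nat) : Int) = 1 - 1 by omega, PySem.List.pyRange_one_eq_nil (by omega)]
    rfl
  | succ m =>
    rw [show ((m + 1 : Nat) : Int) = (m : Int) + 1 by push_cast; ring,
        foldl_eq_lastOpt, show m + 1 - 1 = m from rfl, go_eq_lastOpt]
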